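-- pv_equiv track=rewrite | github.com/joseph-rock/adventofcode | python/2020/day05.py | open_seats
-- ===== SOURCE A (Python) =====
-- def boarding_pass_id(row, col):
--     return (row * 8) + col
--
-- def open_seats(manifest):
--     manifest.sort()
--     plane_seats = []
--     for row in range(127):
--         for col in range(7):
--             plane_seats.append([row, col])
--
--     for i in manifest:
--         if i in plane_seats:
--             plane_seats.remove(i)
--
--     open_seats_ = []
--     for i in plane_seats:
--         open_seats_.append(boarding_pass_id(i[0], i[1]))
--
--     for i in open_seats_:
--         if i - 1 not in open_seats_ and i + 1 not in open_seats_: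
--             return i
-- ===== SOURCE B (Python) =====
-- # B: no open-seat list at all -- mark occupied seat ids in a set once, then scan
-- # candidate ids with a purely local blockedness test: a neighbour id is absent
-- # from the open seats iff it is an invalid seat (col 7 / off the plane) or occupied.
-- # Like A, this sorts `manifest` in place (same observable mutation).
-- def open_seats(manifest):
--     manifest.sort()
--     occupied = set()
--     for seat in manifest:
--         if len(seat) == 2 and 0 <= seat[0] < 127 and 0 <= seat[1] < 7:
--             occupied.add(seat[0] * 8 + seat[1])
--     for sid in range(127 * 8):
--         col = sid % 8
--         if (col < 7 and sid not in occupied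
--                 and (col == 0 or sid - 1 in occupied)
--                 and (col == 6 or sid + 1 in occupied)):
--             return sid
--     return None
-- ===== Notes on version B (the rewrite author's own statement) =====
-- stated objective: faster
-- what changed: A materialises the 889-seat list, deletes each manifest entry from it by linear scan, maps it to an open-id list and then does two linear membership scans of that list per candidate; B never builds an open-seat list at all: it marks occupied seat ids in a set in one pass and scans candidate ids 0..1015 with a local test (open, and each neighbour id either an invalid seat by column arithmetic or occupied).
import Mathlib
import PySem

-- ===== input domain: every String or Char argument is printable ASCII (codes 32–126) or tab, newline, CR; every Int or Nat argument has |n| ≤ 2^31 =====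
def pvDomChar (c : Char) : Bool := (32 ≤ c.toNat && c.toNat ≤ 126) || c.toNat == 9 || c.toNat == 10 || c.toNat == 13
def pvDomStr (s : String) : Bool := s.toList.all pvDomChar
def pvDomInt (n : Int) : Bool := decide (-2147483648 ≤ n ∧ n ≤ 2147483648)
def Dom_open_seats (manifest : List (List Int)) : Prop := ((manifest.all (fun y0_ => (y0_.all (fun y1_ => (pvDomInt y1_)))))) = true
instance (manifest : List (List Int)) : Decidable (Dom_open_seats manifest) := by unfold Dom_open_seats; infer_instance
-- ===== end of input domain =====

-- B never builds A's open-seat list: it marks occupied seat ids in a set and scans candidate ids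
-- with a local blockedness test (a neighbour is missing from the open seats iff it is an invalid
-- column or occupied); A's in-place manifest.sort() is replicated by B in Python.

-- ===== PORT A =====
def boarding_pass_id (row : Int) (col : Int) : Int := (row * 8) + col

def open_seats (manifest : List (List Int)) : Option Int :=
  let m := PySem.List.sorted manifest (fun x => x) false
  let plane_seats : List (List Int) :=
    (PySem.List.pyRange 0 127 1).foldl (fun acc row =>
      (PySem.List.pyRange 0 7 1).foldl (fun acc2 col => acc2 ++ [[row, col]]) acc) []
  let plane_seats2 :=
    m.foldl (fun ps i => if ps.contains i then (PySem.List.remove? ps i).getD ps else ps) plane_seats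
  -- i[0], i[1]: every element of plane_seats is a 2-element list, so the pyGetD defaults are never used
  let open_ids :=
    plane_seats2.foldl (fun acc i =>
      acc ++ [boarding_pass_id (PySem.List.pyGetD i 0 0) (PySem.List.pyGetD i 1 0)]) []
  open_ids.find? (fun i => !(open_ids.contains (i - 1)) && !(open_ids.contains (i + 1)))

-- ===== PORT B =====
def open_seats_alt (manifest : List (List Int)) : Option Int :=
  let m := PySem.List.sorted manifest (fun x => x) false
  -- seat[0], seat[1] are guarded by len(seat) == 2 via Python's short-circuit `and`,
  -- so the pyGetD defaults are never used
  let occupied : PySem.Set Int :=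
    m.foldl (fun occ seat =>
      if seat.length == 2 && decide (0 ≤ PySem.List.pyGetD seat 0 0)
          && decide (PySem.List.pyGetD seat 0 0 < 127)
          && decide (0 ≤ PySem.List.pyGetD seat 1 0)
          && decide (PySem.List.pyGetD seat 1 0 < 7)
      then PySem.Set.add occ (PySem.List.pyGetD seat 0 0 * 8 + PySem.List.pyGetD seat 1 0)
      else occ) PySem.Set.empty
  (PySem.List.pyRange 0 (127 * 8) 1).find? (fun sid =>
    let col := PySem.Int.mod sid 8
    decide (col < 7) && !(occupied.contains sid)
      && (decide (col = 0) || occupied.contains (sid - 1))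
      && (decide (col = 6) || occupied.contains (sid + 1)))

-- ===== PRECONDITION & SPEC =====
def Spec_open_seats (manifest : List (List Int)) (out : Option Int) : Prop := out = open_seats_alt manifest
instance (manifest : List (List Int)) (out : Option Int) : Decidable (Spec_open_seats manifest out) := by unfold Spec_open_seats; infer_instance

-- ===== CLAIM (what is proved, stated in full; the proofs are below) =====
def Claim_equal_open_seats : Prop := ∀ (manifest : List (List Int)), Dom_open_seats manifest → Spec_open_seats manifest (open_seats manifest)

-- ===== LEMMAS AND PROOFS =====

-- the plane seats and the id map, as the proofs name them
def pvPlane : List (List Int) :=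
  (PySem.List.pyRange 0 127 1).flatMap (fun r => (PySem.List.pyRange 0 7 1).map (fun c => [r, c]))

def pvId (s : List Int) : Int := (PySem.List.pyGetD s 0 0) * 8 + (PySem.List.pyGetD s 1 0)

-- A's open-id list, and B's occupied set / "some valid occupied seat has id x" predicate
def pvL (m : List (List Int)) : List Int :=
  (pvPlane.filter (fun s => !(m.contains s))).map pvId

def pvOccStep (occ : PySem.Set Int) (seat : List Int) : PySem.Set Int :=
  if seat.length == 2 && decide (0 ≤ PySem.List.pyGetD seat 0 0)
      && decide (PySem.List.pyGetD seat 0 0 < 127)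
      && decide (0 ≤ PySem.List.pyGetD seat 1 0)
      && decide (PySem.List.pyGetD seat 1 0 < 7)
  then PySem.Set.add occ (PySem.List.pyGetD seat 0 0 * 8 + PySem.List.pyGetD seat 1 0)
  else occ

def pvOccP (m : List (List Int)) (x : Int) : Prop :=
  ∃ r c : Int, 0 ≤ r ∧ r < 127 ∧ 0 ≤ c ∧ c < 7 ∧ [r, c] ∈ m ∧ x = r * 8 + c

def pvValid (x : Int) : Prop := 0 ≤ x ∧ x < 1016 ∧ x % 8 < 7

set_option maxRecDepth 20000 in
theorem pvPlane_pairwise : (pvPlane.map pvId).Pairwise (· < ·) := by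
  rw [← List.isChain_iff_pairwise]
  decide

theorem pvPlane_build :
    (PySem.List.pyRange 0 127 1).foldl (fun acc row =>
      (PySem.List.pyRange 0 7 1).foldl (fun acc2 col => acc2 ++ [[row, col]]) acc) []
      = pvPlane := by
  have h : ∀ (row : Int) (acc : List (List Int)),
      (PySem.List.pyRange 0 7 1).foldl (fun acc2 col => acc2 ++ [[row, col]]) acc
        = acc ++ (PySem.List.pyRange 0 7 1).map (fun c => [row, c]) := by
    intro row acc
    exact PySem.List.foldl_append_singleton_eq_map (fun c => [row, c]) _ acc
  simp only [h]
  exact PySem.List.foldl_append_eq_flatMap _ _ []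

theorem step_eq_erase (ps : List (List Int)) (i : List Int) :
    (if ps.contains i then (PySem.List.remove? ps i).getD ps else ps) = ps.erase i := by
  by_cases h : i ∈ ps
  · rw [PySem.List.remove?_eq_some_erase ps i h] ; simp [h]
  · simp [h, List.erase_of_not_mem h]

theorem foldl_erase_filter (m : List (List Int)) :
    ∀ (ps : List (List Int)), ps.Nodup →
    m.foldl (fun ps i => ps.erase i) ps = ps.filter (fun s => !(m.contains s)) := by
  induction m with
  | nil => intro ps _; simp
  | cons i m ih =>
    intro ps h
    simp only [List.foldl_cons]
    rw [ih _ (h.erase i), List.Nodup.erase_eq_filter h, List.filter_filter]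
    apply List.filter_congr
    intro s _
    by_cases hs : s = i <;> simp [hs]

theorem removal_eq_filter (m ps : List (List Int)) (h : ps.Nodup) :
    m.foldl (fun ps i => if ps.contains i then (PySem.List.remove? ps i).getD ps else ps) ps
      = ps.filter (fun s => !(m.contains s)) := by
  simp only [step_eq_erase]
  exact foldl_erase_filter m ps h

theorem pvPlane_nodup : pvPlane.Nodup := by
  have h := (List.pairwise_map.mp pvPlane_pairwise)
  exact h.imp (fun {a b} hlt => by intro e; subst e; exact absurd hlt (lt_irrefl _))

theorem pvL_pairwise (m : List (List Int)) : (pvL m).Pairwise (· < ·) :=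
  List.Pairwise.sublist (List.Sublist.map pvId (List.filter_sublist (l := pvPlane))) pvPlane_pairwise

-- membership in pvPlane
theorem mem_pvPlane (s : List Int) :
    s ∈ pvPlane ↔ ∃ r c : Int, 0 ≤ r ∧ r < 127 ∧ 0 ≤ c ∧ c < 7 ∧ s = [r, c] := by
  unfold pvPlane
  simp only [List.mem_flatMap, List.mem_map, PySem.List.mem_pyRange_one]
  constructor
  · rintro ⟨r, hr, c, hc, rfl⟩
    exact ⟨r, c, hr.1, hr.2, hc.1, hc.2, rfl⟩
  · rintro ⟨r, c, hr0, hr1, hc0, hc1, rfl⟩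
    exact ⟨r, ⟨hr0, hr1⟩, c, ⟨hc0, hc1⟩, rfl⟩

theorem pvId_pair (r c : Int) : pvId [r, c] = r * 8 + c := rfl

-- membership in A's open-id list
theorem mem_pvL (m : List (List Int)) (x : Int) :
    x ∈ pvL m ↔ pvValid x ∧ ¬ pvOccP m x := by
  unfold pvL
  rw [List.mem_map]
  constructor
  · rintro ⟨s, hs, rfl⟩
    rw [List.mem_filter] at hs
    obtain ⟨hsp, hsm⟩ := hs
    rw [mem_pvPlane] at hsp
    obtain ⟨r, c, hr0, hr1, hc0, hc1, rfl⟩ := hsp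
    simp only [List.contains_eq_mem, Bool.not_eq_eq_eq_not, Bool.not_true, decide_eq_false_iff_not] at hsm
    rw [pvId_pair]
    refine ⟨by unfold pvValid; omega, ?_⟩
    rintro ⟨r', c', hr0', hr1', hc0', hc1', hmem', heq'⟩
    have : r' = r ∧ c' = c := by omega
    obtain ⟨rfl, rfl⟩ := this
    exact hsm hmem'
  · rintro ⟨hv, hno⟩
    obtain ⟨hx0, hx1, hxm⟩ := hv
    refine ⟨[x / 8, x % 8], ?_, ?_⟩
    · rw [List.mem_filter]
      constructor
      · rw [mem_pvPlane]
        exact ⟨x / 8, x % 8, by omega, by omega, by omega, by omega, rfl⟩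
      · simp only [List.contains_eq_mem, Bool.not_eq_eq_eq_not, Bool.not_true, decide_eq_false_iff_not]
        intro hmem
        exact hno ⟨x / 8, x % 8, by omega, by omega, by omega, by omega, hmem, by omega⟩
    · rw [pvId_pair]; omega

-- a two-element list is [its 0th, its 1st]
theorem two_elem (s : List Int) (h : s.length = 2) :
    s = [PySem.List.pyGetD s 0 0, PySem.List.pyGetD s 1 0] := by
  match s, h with
  | [a, b], _ => rfl

-- membership in B's occupied set
theorem mem_occ_aux (l : List (List Int)) :
    ∀ (s : PySem.Set Int) (y : Int),
      y ∈ l.foldl pvOccStep s ↔ y ∈ s ∨ pvOccP l y := by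
  induction l with
  | nil => intro s y; simp [pvOccP]
  | cons seat l ih =>
    intro s y
    rw [List.foldl_cons, ih]
    unfold pvOccStep
    constructor
    · rintro (hmem | hocc)
      · by_cases hc : (seat.length == 2 && decide (0 ≤ PySem.List.pyGetD seat 0 0)
            && decide (PySem.List.pyGetD seat 0 0 < 127)
            && decide (0 ≤ PySem.List.pyGetD seat 1 0)
            && decide (PySem.List.pyGetD seat 1 0 < 7)) = true
        · rw [if_pos hc, PySem.Set.mem_add] at hmem
          rcases hmem with hmem | rfl
          · exact Or.inl hmem
          · simp only [Bool.and_eq_true, beq_iff_eq, decide_eq_true_eq] at hc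
            obtain ⟨⟨⟨⟨h2, ha0⟩, ha1⟩, hb0⟩, hb1⟩ := hc
            refine Or.inr ⟨PySem.List.pyGetD seat 0 0, PySem.List.pyGetD seat 1 0,
              ha0, ha1, hb0, hb1, ?_, rfl⟩
            rw [← two_elem seat h2]; exact List.mem_cons_self
        · rw [if_neg hc] at hmem
          exact Or.inl hmem
      · obtain ⟨r, c, hr0, hr1, hc0, hc1, hmem, rfl⟩ := hocc
        exact Or.inr ⟨r, c, hr0, hr1, hc0, hc1, List.mem_cons_of_mem _ hmem, rfl⟩
    · rintro (hmem | hocc)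
      · split
        · rw [PySem.Set.mem_add]; exact Or.inl (Or.inl hmem)
        · exact Or.inl hmem
      · obtain ⟨r, c, hr0, hr1, hc0, hc1, hmem, rfl⟩ := hocc
        rcases List.mem_cons.mp hmem with rfl | hmem'
        · have hc : (([r, c].length == 2) && decide (0 ≤ PySem.List.pyGetD [r, c] 0 0)
              && decide (PySem.List.pyGetD [r, c] 0 0 < 127)
              && decide (0 ≤ PySem.List.pyGetD [r, c] 1 0)
              && decide (PySem.List.pyGetD [r, c] 1 0 < 7)) = true := by
            have e0 : PySem.List.pyGetD [r, c] 0 0 = r := rfl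
            have e1 : PySem.List.pyGetD [r, c] 1 0 = c := rfl
            simp [e0, e1, hr0, hr1, hc0, hc1]
          rw [if_pos hc, PySem.Set.mem_add]
          refine Or.inl (Or.inr ?_)
          have e0 : PySem.List.pyGetD [r, c] 0 0 = r := rfl
          have e1 : PySem.List.pyGetD [r, c] 1 0 = c := rfl
          rw [e0, e1]
        · right; exact ⟨r, c, hr0, hr1, hc0, hc1, hmem', rfl⟩

theorem occP_valid (m : List (List Int)) (y : Int) (h : pvOccP m y) : pvValid y := by
  obtain ⟨r, c, hr0, hr1, hc0, hc1, _, rfl⟩ := h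
  unfold pvValid; omega

-- the local blockedness test, against "the neighbour is an open id", abstractly in the occupancy O
theorem pv_key (O : Int → Prop) (hO : ∀ y, O y → pvValid y) (x : Int)
    (hx0 : 0 ≤ x) (hx1 : x < 1016) :
    ((pvValid x ∧ ¬ O x) ∧ ¬ (pvValid (x - 1) ∧ ¬ O (x - 1)) ∧ ¬ (pvValid (x + 1) ∧ ¬ O (x + 1)))
      ↔ (x % 8 < 7 ∧ ¬ O x ∧ (x % 8 = 0 ∨ O (x - 1)) ∧ (x % 8 = 6 ∨ O (x + 1))) := by
  have h1 := hO (x - 1)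
  have h2 := hO (x + 1)
  unfold pvValid at h1 h2 ⊢
  by_cases o1 : O (x - 1) <;> by_cases o2 : O (x + 1) <;> by_cases ox : O x
  all_goals (try have hb1 := h1 o1)
  all_goals (try have hb2 := h2 o2)
  all_goals simp only [o1, o2, ox, not_true_eq_false, not_false_eq_true,
    true_and, and_true, false_and, and_false, or_true, or_false, not_and, not_lt]
  all_goals omega

-- two strictly increasing Int lists with the same members are equal
theorem eq_of_pairwise_lt_mem (l1 l2 : List Int)
    (h1 : l1.Pairwise (· < ·)) (h2 : l2.Pairwise (· < ·))
    (hm : ∀ x, x ∈ l1 ↔ x ∈ l2) : l1 = l2 := by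
  have n1 : l1.Nodup := h1.imp (fun {a b} h => by intro e; subst e; exact absurd h (lt_irrefl _))
  have n2 : l2.Nodup := h2.imp (fun {a b} h => by intro e; subst e; exact absurd h (lt_irrefl _))
  have p1 : l1.Perm l1 := List.Perm.refl l1
  have p2 : l2.Perm l1 := (List.perm_ext_iff_of_nodup n2 n1).mpr (fun a => (hm a).symm)
  have e1 := PySem.List.sorted_eq_of_perm_of_pairwise_lt l1 l1 (fun x : Int => x) p1 h1
  have e2 := PySem.List.sorted_eq_of_perm_of_pairwise_lt l1 l2 (fun x : Int => x) p2 h2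
  rw [e1] at e2; exact e2

-- the two filtered candidate lists coincide
theorem filters_eq (m : List (List Int)) (occ : PySem.Set Int)
    (hocc : ∀ y, y ∈ occ ↔ pvOccP m y) :
    (pvL m).filter (fun i => !((pvL m).contains (i - 1)) && !((pvL m).contains (i + 1)))
      = (PySem.List.pyRange 0 (127 * 8) 1).filter (fun sid =>
          decide (PySem.Int.mod sid 8 < 7) && !(occ.contains sid)
            && (decide (PySem.Int.mod sid 8 = 0) || occ.contains (sid - 1))
            && (decide (PySem.Int.mod sid 8 = 6) || occ.contains (sid + 1))) := by
  apply eq_of_pairwise_lt_mem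
  · exact List.Pairwise.sublist List.filter_sublist (pvL_pairwise m)
  · exact List.Pairwise.sublist List.filter_sublist (PySem.List.pairwise_lt_pyRange_one 0 (127 * 8))
  · intro x
    rw [List.mem_filter, List.mem_filter]
    have hmod : PySem.Int.mod x 8 = x % 8 := PySem.Int.mod_eq_emod_of_pos (by norm_num)
    constructor
    · rintro ⟨hmem, hp⟩
      have hv := (mem_pvL m x).mp hmem
      have hx0 : 0 ≤ x := hv.1.1
      have hx1 : x < 1016 := hv.1.2.1
      simp only [Bool.and_eq_true, Bool.not_eq_eq_eq_not, Bool.not_true,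
        List.contains_eq_mem, decide_eq_false_iff_not] at hp
      have hk := (pv_key (pvOccP m) (occP_valid m) x hx0 hx1).mp
        ⟨hv, by rw [← mem_pvL m (x - 1)]; exact hp.1, by rw [← mem_pvL m (x + 1)]; exact hp.2⟩
      refine ⟨by rw [PySem.List.mem_pyRange_one]; omega, ?_⟩
      simp only [Bool.and_eq_true, Bool.or_eq_true, Bool.not_eq_eq_eq_not, Bool.not_true,
        decide_eq_true_eq, hmod, PySem.Set.contains_eq_listContains, List.contains_eq_mem,
        decide_eq_false_iff_not, hocc]
      obtain ⟨hk1, hk2, hk3, hk4⟩ := hk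
      refine ⟨⟨⟨hk1, by simpa using hk2⟩, hk3⟩, hk4⟩
    · rintro ⟨hmem, hp⟩
      rw [PySem.List.mem_pyRange_one] at hmem
      have hx0 : 0 ≤ x := hmem.1
      have hx1 : x < 1016 := by have := hmem.2; omega
      simp only [Bool.and_eq_true, Bool.or_eq_true, Bool.not_eq_eq_eq_not, Bool.not_true,
        decide_eq_true_eq, hmod, PySem.Set.contains_eq_listContains, List.contains_eq_mem,
        decide_eq_false_iff_not, hocc] at hp
      obtain ⟨⟨⟨hp1, hp2⟩, hp3⟩, hp4⟩ := hp
      have hk := (pv_key (pvOccP m) (occP_valid m) x hx0 hx1).mpr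
        ⟨hp1, by simpa using hp2, hp3, hp4⟩
      obtain ⟨hin, hl, hr⟩ := hk
      refine ⟨(mem_pvL m x).mpr hin, ?_⟩
      simp only [Bool.and_eq_true, Bool.not_eq_eq_eq_not, Bool.not_true,
        List.contains_eq_mem, decide_eq_false_iff_not]
      exact ⟨by rw [mem_pvL m (x - 1)] at *; exact hl, by rw [mem_pvL m (x + 1)] at *; exact hr⟩

-- ===== VERDICT (by name: the statement is the Claim_ definition above) =====
set_option maxRecDepth 20000 in
theorem open_seats_spec : Claim_equal_open_seats := by
  intro manifest _
  show open_seats manifest = open_seats_alt manifest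
  unfold open_seats open_seats_alt
  simp only []
  rw [pvPlane_build]
  rw [removal_eq_filter _ _ pvPlane_nodup]
  rw [PySem.List.foldl_append_singleton_eq_map]
  rw [List.nil_append]
  have hL : (pvPlane.filter (fun s =>
      !((PySem.List.sorted manifest (fun x => x) false).contains s))).map
        (fun i => boarding_pass_id (PySem.List.pyGetD i 0 0) (PySem.List.pyGetD i 1 0))
      = pvL (PySem.List.sorted manifest (fun x => x) false) := rfl
  rw [hL]
  rw [← List.head?_filter, ← List.head?_filter]
  congr 1
  have hfold : (PySem.List.sorted manifest (fun x => x) false).foldl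
      (fun occ seat =>
        if seat.length == 2 && decide (0 ≤ PySem.List.pyGetD seat 0 0)
            && decide (PySem.List.pyGetD seat 0 0 < 127)
            && decide (0 ≤ PySem.List.pyGetD seat 1 0)
            && decide (PySem.List.pyGetD seat 1 0 < 7)
        then PySem.Set.add occ (PySem.List.pyGetD seat 0 0 * 8 + PySem.List.pyGetD seat 1 0)
        else occ) PySem.Set.empty
      = (PySem.List.sorted manifest (fun x => x) false).foldl pvOccStep PySem.Set.empty := rfl
  rw [hfold]
  apply filters_eq
  intro y
  rw [mem_occ_aux]
  simp [PySem.Set.empty]
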